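-- pv_equiv track=rewrite | github.com/kwyjad/Pythia | scripts/ci/summarize_connectors.py | _format_reason_histogram
-- ===== SOURCE A (Python) =====
-- from collections import Counter
-- from typing import Any, Dict, Iterable, List, Mapping, Sequence, Tuple
--
-- REASON_HISTOGRAM_LIMIT = 5
--
-- def _format_reason_histogram(entries: Sequence[Mapping[str, Any]]) -> str:
--     counter: Counter[str] = Counter()
--     for entry in entries:
--         reason = entry.get("reason")
--         if not reason:
--             continue
--         cleaned = str(reason).strip()
--         if cleaned:
--             counter[cleaned] += 1
--     if not counter:
--         return "—"
--     limited = list(counter.items())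
--     limited.sort(key=lambda item: item[0])
--     parts = [f"{reason}={count}" for reason, count in limited[:REASON_HISTOGRAM_LIMIT]]
--     return ", ".join(parts)
-- ===== SOURCE B (Python) =====
-- REASON_HISTOGRAM_LIMIT = 5
--
--
-- def _format_reason_histogram(entries):
--     reasons = []
--     for entry in entries:
--         reason = entry.get("reason")
--         if not reason:
--             continue
--         cleaned = str(reason).strip()
--         if cleaned:
--             reasons.append(cleaned)
--     if not reasons:
--         return "—"
--     reasons.sort()
--     # run-length grouping of the sorted list: one (key, count) per maximal run
--     groups = []
--     run_key = reasons[0]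
--     run_len = 1
--     for r in reasons[1:]:
--         if r == run_key:
--             run_len += 1
--         else:
--             groups.append((run_key, run_len))
--             run_key = r
--             run_len = 1
--     groups.append((run_key, run_len))
--     return ", ".join(f"{k}={c}" for k, c in groups[:REASON_HISTOGRAM_LIMIT])
-- ===== Notes on version B (the rewrite author's own statement) =====
-- stated objective: alternative
-- what changed: B replaces the hash-based Counter (increment per entry, then sort the distinct items) by a sort-then-scan algorithm: it sorts all cleaned reasons and emits one (key, count) pair per maximal run of consecutive equal strings.
import Mathlib
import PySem

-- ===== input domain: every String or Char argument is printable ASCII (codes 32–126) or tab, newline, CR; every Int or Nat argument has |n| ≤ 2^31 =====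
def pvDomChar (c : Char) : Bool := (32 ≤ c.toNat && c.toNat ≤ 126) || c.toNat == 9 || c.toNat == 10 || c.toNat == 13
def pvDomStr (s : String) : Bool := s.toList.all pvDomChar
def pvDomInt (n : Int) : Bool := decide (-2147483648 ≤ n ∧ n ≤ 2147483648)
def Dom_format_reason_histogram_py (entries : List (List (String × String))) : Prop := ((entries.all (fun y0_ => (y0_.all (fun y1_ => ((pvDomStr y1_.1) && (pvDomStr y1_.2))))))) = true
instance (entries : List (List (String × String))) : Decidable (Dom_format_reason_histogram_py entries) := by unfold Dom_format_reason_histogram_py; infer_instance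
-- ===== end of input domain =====

-- B replaces A's hash-based Counter-then-sort-items pipeline by a sort-then-scan:
-- it sorts all cleaned reasons and run-length-groups consecutive equal strings (alternative, not faster).

-- ===== PORT A =====
-- Counter built incrementally over the entries, then its items sorted by key.
def format_reason_histogram_py (entries : List (List (String × String))) : String :=
  let counter : PySem.Dict String Int :=
    entries.foldl (fun d entry =>
      match entry.lookup "reason" with
      | none => d
      | some reason =>
        if reason == "" then d
        else
          let cleaned := PySem.Str.strip reason
          if cleaned == "" then d
          else d.insert cleaned (d.getD cleaned 0 + 1)) PySem.Dict.empty
  if counter.items.isEmpty then "—"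
  else
    let limited := PySem.List.sorted counter.items (fun item => item.1)
    let parts := (limited.take 5).map (fun item => item.1 ++ "=" ++ PySem.Int.toStr item.2)
    PySem.Str.join ", " parts

-- ===== PORT B =====
-- the for-loop over reasons[1:] with the (run_key, run_len) accumulator; the base
-- case is the trailing `groups.append((run_key, run_len))` after the loop
def pvGroup : String → Int → List String → List (String × Int)
  | k, n, [] => [(k, n)]
  | k, n, r :: rs => if r == k then pvGroup k (n + 1) rs else (k, n) :: pvGroup r 1 rs

-- Collect cleaned reasons, sort them all, run-length group consecutive equal strings.
def format_reason_histogram_py_alt (entries : List (List (String × String))) : String :=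
  let reasons : List String :=
    entries.foldl (fun acc entry =>
      match entry.lookup "reason" with
      | none => acc
      | some reason =>
        if reason == "" then acc
        else
          let cleaned := PySem.Str.strip reason
          if cleaned == "" then acc
          else acc ++ [cleaned]) []
  if reasons.isEmpty then "—"
  else
    match PySem.List.sorted reasons (fun x => x) with
    | [] => "—"  -- unreachable: sorted of a nonempty list is nonempty
    | r0 :: rest =>
      let groups := pvGroup r0 1 rest
      PySem.Str.join ", " ((groups.take 5).map (fun p => p.1 ++ "=" ++ PySem.Int.toStr p.2))

-- ===== PRECONDITION & SPEC =====
def Spec_format_reason_histogram_py (entries : List (List (String × String))) (out : String) : Prop := out = format_reason_histogram_py_alt entries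
instance (entries : List (List (String × String))) (out : String) : Decidable (Spec_format_reason_histogram_py entries out) := by unfold Spec_format_reason_histogram_py; infer_instance

-- ===== CLAIM (what is proved, stated in full; the proofs are below) =====
def Claim_equal_format_reason_histogram_py : Prop := ∀ (entries : List (List (String × String))), Dom_format_reason_histogram_py entries → Spec_format_reason_histogram_py entries (format_reason_histogram_py entries)

-- ===== LEMMAS AND PROOFS =====

-- the cleaned reason extracted from one entry, if any (shared characterisation of both loops)
def pvEx (entry : List (String × String)) : Option String :=
  match entry.lookup "reason" with
  | none => none
  | some reason =>
    if reason == "" then none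
    else
      let cleaned := PySem.Str.strip reason
      if cleaned == "" then none else some cleaned

theorem pvFoldA (entries : List (List (String × String))) (d : PySem.Dict String Int) :
    entries.foldl (fun d entry =>
      match entry.lookup "reason" with
      | none => d
      | some reason =>
        if reason == "" then d
        else
          let cleaned := PySem.Str.strip reason
          if cleaned == "" then d
          else d.insert cleaned (d.getD cleaned 0 + 1)) d
    = (entries.filterMap pvEx).foldl (fun d c => d.insert c (d.getD c 0 + 1)) d := by
  induction entries generalizing d with
  | nil => rfl
  | cons e es ih =>
    rw [List.foldl_cons, List.filterMap_cons]
    cases hre : e.lookup "reason" with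
    | none =>
      have hpe : pvEx e = none := by simp [pvEx, hre]
      simp only [hpe]
      exact ih d
    | some r =>
      by_cases h1 : r == ""
      · have hpe : pvEx e = none := by simp [pvEx, hre, h1]
        simp only [hpe, h1, if_true]
        exact ih d
      · by_cases h2 : PySem.Str.strip r == ""
        · have hpe : pvEx e = none := by simp [pvEx, hre, h1, h2]
          simp only [hpe, h1, h2]
          simp only [Bool.false_eq_true, if_false, if_true]
          exact ih d
        · have hpe : pvEx e = some (PySem.Str.strip r) := by simp [pvEx, hre, h1, h2]
          simp only [hpe, h1, h2]
          simp only [Bool.false_eq_true, if_false, List.foldl_cons]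
          exact ih _

theorem pvFoldB (entries : List (List (String × String))) (acc : List String) :
    entries.foldl (fun acc entry =>
      match entry.lookup "reason" with
      | none => acc
      | some reason =>
        if reason == "" then acc
        else
          let cleaned := PySem.Str.strip reason
          if cleaned == "" then acc
          else acc ++ [cleaned]) acc
    = acc ++ entries.filterMap pvEx := by
  induction entries generalizing acc with
  | nil => simp
  | cons e es ih =>
    rw [List.foldl_cons, List.filterMap_cons]
    cases hre : e.lookup "reason" with
    | none =>
      have hpe : pvEx e = none := by simp [pvEx, hre]
      simp only [hpe]
      exact ih acc
    | some r =>
      by_cases h1 : r == ""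
      · have hpe : pvEx e = none := by simp [pvEx, hre, h1]
        simp only [hpe, h1, if_true]
        exact ih acc
      · by_cases h2 : PySem.Str.strip r == ""
        · have hpe : pvEx e = none := by simp [pvEx, hre, h1, h2]
          simp only [hpe, h1, h2]
          simp only [Bool.false_eq_true, if_false, if_true]
          exact ih acc
        · have hpe : pvEx e = some (PySem.Str.strip r) := by simp [pvEx, hre, h1, h2]
          simp only [hpe, h1, h2]
          simp only [Bool.false_eq_true, if_false]
          rw [ih]
          simp

-- sorting the counter's (key, count) items by key = mapping the count over the sorted distinct keys
theorem pvSortedItems (rs : List String) :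
    PySem.List.sorted ((PySem.Set.ofList rs).map (fun k => (k, (rs.count k : Int)))) (fun item => item.1)
    = (PySem.List.sorted (PySem.Set.ofList rs) (fun k => k)).map (fun k => (k, (rs.count k : Int))) := by
  apply PySem.List.sorted_eq_of_perm_of_pairwise_lt
  · exact List.Perm.map _ (PySem.List.sorted_perm (PySem.Set.ofList rs) (fun k => k) false)
  · have hle := PySem.List.sorted_pairwise (PySem.Set.ofList rs) (fun k => k)
    have hnd : (PySem.List.sorted (PySem.Set.ofList rs) (fun k => k)).Nodup :=
      ((PySem.List.sorted_perm (PySem.Set.ofList rs) (fun k => k) false).nodup_iff).mpr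
        (PySem.Set.nodup_ofList rs)
    have hlt : List.Pairwise (fun a b : String => a < b)
        (PySem.List.sorted (PySem.Set.ofList rs) (fun k => k)) := by
      have := hle.and hnd
      exact this.imp (fun h => lt_of_le_of_ne h.1 h.2)
    exact hlt.map _ (fun a b h => h)

-- a run of equal keys is absorbed into the running count
theorem pvGroupRep (p : Nat) (k : String) (n : Int) (rest : List String) :
    pvGroup k n (List.replicate p k ++ rest) = pvGroup k (n + p) rest := by
  induction p generalizing n with
  | zero => simp
  | succ q ih =>
    rw [List.replicate_succ, List.cons_append]
    show pvGroup k n (k :: _) = _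
    rw [pvGroup, if_pos (by simp), ih]
    congr 1
    push_cast
    ring

-- counting in the flattened replicate blocks
theorem pvCountFlatZero (ks : List String) (cnt : String → Nat) (a : String)
    (ha : a ∉ ks) :
    (ks.flatMap fun k => List.replicate (cnt k) k).count a = 0 := by
  induction ks with
  | nil => simp
  | cons k ks ih =>
    have hak : a ≠ k := fun h => ha (h ▸ List.mem_cons_self)
    rw [List.flatMap_cons, List.count_append, ih (fun h => ha (List.mem_cons_of_mem _ h))]
    simp [List.count_replicate, Ne.symm hak]

theorem pvCountFlatMem (ks : List String) (cnt : String → Nat) (a : String)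
    (hnd : ks.Nodup) (ha : a ∈ ks) :
    (ks.flatMap fun k => List.replicate (cnt k) k).count a = cnt a := by
  induction ks with
  | nil => simp at ha
  | cons k ks ih =>
    rw [List.flatMap_cons, List.count_append]
    rcases List.mem_cons.mp ha with h | h
    · subst h
      rw [pvCountFlatZero ks cnt a (List.nodup_cons.mp hnd).1]
      simp
    · have hne : a ≠ k := fun he => (List.nodup_cons.mp hnd).1 (he ▸ h)
      rw [ih (List.nodup_cons.mp hnd).2 h]
      simp [List.count_replicate, Ne.symm hne]

theorem pvFlatPerm (rs : List String) :
    ((PySem.List.sorted (PySem.Set.ofList rs) (fun k => k)).flatMap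
      fun k => List.replicate (rs.count k) k).Perm rs := by
  set ks := PySem.List.sorted (PySem.Set.ofList rs) (fun k => k) with hks
  have hnd : ks.Nodup :=
    ((PySem.List.sorted_perm (PySem.Set.ofList rs) (fun k => k) false).nodup_iff).mpr
      (PySem.Set.nodup_ofList rs)
  rw [List.perm_iff_count]
  intro a
  by_cases ha : a ∈ ks
  · rw [pvCountFlatMem ks _ a hnd ha]
  · rw [pvCountFlatZero ks _ a ha]
    have haks : a ∉ rs := fun h => ha (by
      rw [hks, PySem.List.mem_sorted, PySem.Set.mem_ofList]; exact h)
    exact (List.count_eq_zero.mpr haks).symm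

theorem pvFlatPairwise (ks : List String) (cnt : String → Nat)
    (h : ks.Pairwise (· < ·)) :
    (ks.flatMap fun k => List.replicate (cnt k) k).Pairwise
      (fun a b : String => a ≤ b) := by
  induction ks with
  | nil => simp
  | cons k ks ih =>
    rw [List.flatMap_cons, List.pairwise_append]
    refine ⟨?_, ih (List.pairwise_cons.mp h).2, ?_⟩
    · exact List.pairwise_replicate.mpr (Or.inr le_rfl)
    · intro x hx y hy
      have hx' : x = k := List.eq_of_mem_replicate hx
      rcases List.mem_flatMap.mp hy with ⟨k2, hk2, hy'⟩
      have hy2 : y = k2 := List.eq_of_mem_replicate hy'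
      rw [hx', hy2]
      exact le_of_lt ((List.pairwise_cons.mp h).1 k2 hk2)

-- the sorted reasons list is the sorted distinct keys, each repeated its count
theorem pvSortedEqFlat (rs : List String) :
    PySem.List.sorted rs (fun x => x) false
    = (PySem.List.sorted (PySem.Set.ofList rs) (fun k => k)).flatMap
        fun k => List.replicate (rs.count k) k := by
  apply PySem.List.sorted_id_eq_of_perm_of_pairwise
  · exact pvFlatPerm rs
  · exact pvFlatPairwise _ _ (PySem.List.sorted_ofList_pairwise_lt rs)

-- grouping the flattened blocks yields one (key, count) pair per key
theorem pvGroupFlat (ks : List String) (cnt : String → Nat) :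
    ∀ (k : String) (m : Int), (∀ k2 ∈ ks, k < k2) → ks.Pairwise (· < ·) →
    (∀ k2 ∈ ks, 1 ≤ cnt k2) →
    pvGroup k m (ks.flatMap fun k2 => List.replicate (cnt k2) k2)
      = (k, m) :: ks.map (fun k2 => (k2, (cnt k2 : Int))) := by
  induction ks with
  | nil => intro k m _ _ _; rfl
  | cons b ks ih =>
    intro k m hlt hpw hcnt
    rw [List.flatMap_cons]
    have h1 : 1 ≤ cnt b := hcnt b List.mem_cons_self
    have hrep : List.replicate (cnt b) b = b :: List.replicate (cnt b - 1) b := by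
      conv_lhs => rw [show cnt b = (cnt b - 1) + 1 by omega]
      rw [List.replicate_succ]
    rw [hrep, List.cons_append]
    show pvGroup k m (b :: _) = _
    have hne : (b == k) = false := by
      simp only [beq_eq_false_iff_ne, ne_eq]
      exact fun h => absurd (hlt b List.mem_cons_self) (h ▸ lt_irrefl b)
    rw [pvGroup, hne, if_neg (by simp), pvGroupRep]
    have hc : (1 : Int) + ((cnt b - 1 : Nat) : Int) = (cnt b : Int) := by
      push_cast [h1]; omega
    rw [hc, ih b (cnt b) (List.pairwise_cons.mp hpw).1 (List.pairwise_cons.mp hpw).2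
      (fun a ha => hcnt a (List.mem_cons_of_mem _ ha)), List.map_cons]

theorem pvMain (entries : List (List (String × String))) :
    format_reason_histogram_py entries = format_reason_histogram_py_alt entries := by
  unfold format_reason_histogram_py format_reason_histogram_py_alt
  simp only [pvFoldA, pvFoldB, PySem.Dict.foldl_insert_getD_add_one_eq_counter,
    PySem.Dict.items_counter, List.nil_append]
  by_cases h : entries.filterMap pvEx = []
  · simp [h]
  · set rs := entries.filterMap pvEx with hrs
    have hS : PySem.Set.ofList rs ≠ [] := by
      intro hS
      rcases List.exists_mem_of_ne_nil rs h with ⟨x, hx⟩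
      have := (PySem.Set.mem_ofList rs x).mpr hx
      simp [hS] at this
    set ks := PySem.List.sorted (PySem.Set.ofList rs) (fun k => k) with hks
    have hkne : ks ≠ [] := by
      rw [hks, Ne, PySem.List.sorted_eq_nil_iff]
      exact hS
    obtain ⟨k0, ks1, hk⟩ := List.exists_cons_of_ne_nil hkne
    have hpw : ks.Pairwise (· < ·) := by
      rw [hks]; exact PySem.List.sorted_ofList_pairwise_lt rs
    have hcnts : ∀ a ∈ ks, 1 ≤ rs.count a := by
      intro a ha
      have : a ∈ rs := by
        rw [hks, PySem.List.mem_sorted, PySem.Set.mem_ofList] at ha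
        exact ha
      exact List.count_pos_iff.mpr this
    have h1 : 1 ≤ rs.count k0 := hcnts k0 (hk ▸ List.mem_cons_self)
    have hrep : List.replicate (rs.count k0) k0 = k0 :: List.replicate (rs.count k0 - 1) k0 := by
      conv_lhs => rw [show rs.count k0 = (rs.count k0 - 1) + 1 by omega]
      rw [List.replicate_succ]
    have hpw' : (k0 :: ks1).Pairwise (· < ·) := hk ▸ hpw
    have hsrt : PySem.List.sorted rs (fun x => x) false
        = k0 :: (List.replicate (rs.count k0 - 1) k0
            ++ ks1.flatMap (fun k2 => List.replicate (rs.count k2) k2)) := by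
      rw [pvSortedEqFlat, ← hks, hk, List.flatMap_cons, hrep, List.cons_append]
    have hc : (1 : Int) + ((rs.count k0 - 1 : Nat) : Int) = (rs.count k0 : Int) := by
      push_cast [h1]; omega
    have hgrp : pvGroup k0 1 (List.replicate (rs.count k0 - 1) k0
            ++ ks1.flatMap (fun k2 => List.replicate (rs.count k2) k2))
        = (k0 :: ks1).map (fun k2 => (k2, (rs.count k2 : Int))) := by
      rw [pvGroupRep, hc, pvGroupFlat ks1 (fun k2 => rs.count k2) k0 (rs.count k0)
        (fun a ha => (List.pairwise_cons.mp hpw').1 a ha)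
        (List.pairwise_cons.mp hpw').2
        (fun a ha => hcnts a (hk ▸ List.mem_cons_of_mem _ ha)), List.map_cons]
    rw [if_neg (by simp [List.isEmpty_iff, hS]), if_neg (by simp [List.isEmpty_iff, h]),
      pvSortedItems, ← hks]
    simp only [hsrt, hgrp, hk, ← List.map_take, List.map_map]

-- ===== VERDICT (by name: the statement is the Claim_ definition above) =====
theorem format_reason_histogram_py_spec : Claim_equal_format_reason_histogram_py := by
  intro entries _
  unfold Spec_format_reason_histogram_py
  exact pvMain entries
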